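-- pv_equiv track=rewrite | github.com/CentreSecuriteIA/textbook | scripts/mkdocs_tabs.py | process_tab_content
-- ===== SOURCE A (Python) =====
-- def process_tab_content(tab_content: str) -> str:
--     """
--     Process content within a tab section.
--     - Indents all non-empty lines with 4 spaces
--     """
--     lines = tab_content.split('\n')
--     indented_lines = []
--
--     for line in lines:
--         # Skip indenting empty lines to preserve spacing
--         if line.strip():
--             indented_lines.append('    ' + line)
--         else:
--             indented_lines.append(line)
--
--     return '\n'.join(indented_lines)
-- ===== SOURCE B (Python) =====
-- import re
--
-- def process_tab_content(tab_content: str) -> str: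
--     """Indent every line containing non-whitespace with 4 spaces (single regex pass)."""
--     return re.sub(r'^(?=[^\S\n]*\S)', '    ', tab_content, flags=re.MULTILINE)
-- ===== Notes on version B (the rewrite author's own statement) =====
-- stated objective: idiomatic
-- what changed: Replaced the split-on-newline/loop/append/join pipeline with a single multiline regex substitution whose start-of-line lookahead inserts four spaces before every line containing non-whitespace.
import Mathlib
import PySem

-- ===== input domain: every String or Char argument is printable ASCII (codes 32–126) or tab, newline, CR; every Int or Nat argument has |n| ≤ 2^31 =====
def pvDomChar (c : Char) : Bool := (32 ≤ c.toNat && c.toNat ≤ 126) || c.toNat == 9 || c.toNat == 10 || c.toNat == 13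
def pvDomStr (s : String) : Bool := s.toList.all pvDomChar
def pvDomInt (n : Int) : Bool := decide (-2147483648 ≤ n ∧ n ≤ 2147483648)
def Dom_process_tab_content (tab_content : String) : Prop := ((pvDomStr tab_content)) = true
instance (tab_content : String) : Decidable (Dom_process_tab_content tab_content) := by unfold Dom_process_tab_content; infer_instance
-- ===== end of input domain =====

-- B replaces A's split/loop/join with a single multiline regex substitution (ported by hand below); objective: idiomatic.

-- ===== PORT A =====
-- lines = tab_content.split('\n'); loop appending '    '+line when line.strip() else line; '\n'.join(...)
def process_tab_content (tab_content : String) : String :=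
  let lines := PySem.Chars.splitOn tab_content.toList ['\n']
  let indented_lines := lines.foldl (fun acc line =>
    if PySem.Chars.strip line ≠ [] then acc ++ ["    ".toList ++ line] else acc ++ [line]) []
  String.mk (PySem.Chars.join ['\n'] indented_lines)

-- ===== PORT B =====
-- Hand port of re.sub(r'^(?=[^\S\n]*\S)', '    ', s, flags=re.MULTILINE): PySem has no regex, so the
-- pattern's semantics are transcribed step for step; exact because the pattern is fixed:
-- pvLookSol is the lookahead (?=[^\S\n]*\S) evaluated at a line start (skip non-newline whitespace,
-- succeed on a non-whitespace char, fail at '\n' or end), pvSubMulti walks the string inserting the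
-- replacement at every MULTILINE '^' position (i.e. after each '\n') where the lookahead holds.
def pvLookSol : List Char → Bool
  | [] => false
  | c :: r => if c = '\n' then false else if PySem.Chars.isspace c then pvLookSol r else true

def pvSubMulti : List Char → List Char
  | [] => []
  | c :: r => c :: (if c = '\n' && pvLookSol r then ' ' :: ' ' :: ' ' :: ' ' :: pvSubMulti r else pvSubMulti r)

def process_tab_content_alt (tab_content : String) : String :=
  let cs := tab_content.toList
  String.mk ((if pvLookSol cs then [' ', ' ', ' ', ' '] else []) ++ pvSubMulti cs)

-- ===== PRECONDITION & SPEC =====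
def Spec_process_tab_content (tab_content : String) (out : String) : Prop := out = process_tab_content_alt tab_content
instance (tab_content : String) (out : String) : Decidable (Spec_process_tab_content tab_content out) := by unfold Spec_process_tab_content; infer_instance

-- ===== CLAIM (what is proved, stated in full; the proofs are below) =====
def Claim_equal_process_tab_content : Prop := ∀ (tab_content : String), Dom_process_tab_content tab_content → Spec_process_tab_content tab_content (process_tab_content tab_content)

-- ===== LEMMAS AND PROOFS =====

-- pure single-char split on '\n' (proof-side model of PySem.Chars.splitOn · ['\n'])
def pvMapHead (f : List Char → List Char) : List (List Char) → List (List Char)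
  | [] => []
  | x :: xs => f x :: xs

def pvSplit : List Char → List (List Char)
  | [] => [[]]
  | c :: r => if c = '\n' then [] :: pvSplit r else pvMapHead (c :: ·) (pvSplit r)

lemma pvSplit_ne_nil (cs : List Char) : pvSplit cs ≠ [] := by
  induction cs with
  | nil => simp [pvSplit]
  | cons c r ih =>
    simp only [pvSplit]
    split
    · simp
    · cases h : pvSplit r with
      | nil => exact absurd h ih
      | cons a t => simp [pvMapHead]

lemma splitOn_go_char (fuel : Nat) (l cur : List Char) (acc : List (List Char))
    (h : l.length < fuel) :
    PySem.Chars.splitOn.go ['\n'] fuel l cur acc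
      = acc.reverse ++ pvMapHead (cur.reverse ++ ·) (pvSplit l) := by
  induction fuel generalizing l cur acc with
  | zero => omega
  | succ fuel ih =>
    cases l with
    | nil => simp [PySem.Chars.splitOn.go, pvSplit, pvMapHead]
    | cons c rest =>
      simp only [PySem.Chars.splitOn.go]
      by_cases hc : c = '\n'
      · subst hc
        have hp : List.isPrefixOf ['\n'] ('\n' :: rest) = true := by simp [List.isPrefixOf]
        simp only [hp, if_true]
        rw [ih _ _ _ (by simpa using Nat.lt_of_succ_lt_succ h)]
        cases hs : pvSplit rest with
        | nil => exact absurd hs (pvSplit_ne_nil rest)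
        | cons a t => simp [pvSplit, hs, pvMapHead]
      · have hp : List.isPrefixOf ['\n'] (c :: rest) = false := by
          simp [List.isPrefixOf]
          intro h
          exact hc h.symm
        simp only [hp, Bool.false_eq_true, if_false]
        rw [ih _ _ _ (by simpa using Nat.lt_of_succ_lt_succ h)]
        cases hs : pvSplit rest with
        | nil => exact absurd hs (pvSplit_ne_nil rest)
        | cons a t => simp [pvSplit, hs, hc, pvMapHead]

lemma splitOn_char (cs : List Char) :
    PySem.Chars.splitOn cs ['\n'] = pvSplit cs := by
  have := splitOn_go_char (cs.length + 1) cs [] [] (by omega)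
  simp only [PySem.Chars.splitOn] at *
  rw [this]
  cases hs : pvSplit cs with
  | nil => exact absurd hs (pvSplit_ne_nil cs)
  | cons a t => simp [pvMapHead]

-- line.strip() is truthy iff the line has a non-whitespace character
lemma strip_eq_nil_iff (l : List Char) :
    PySem.Chars.strip l = [] ↔ l.all PySem.Chars.isspace = true := by
  simp only [PySem.Chars.strip, PySem.Chars.rstrip, PySem.Chars.lstrip,
    List.reverse_eq_nil_iff, List.dropWhile_eq_nil_iff, List.mem_reverse, List.all_eq_true]
  constructor
  · intro h x hx
    by_cases hsp : PySem.Chars.isspace x = true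
    · exact hsp
    · refine h x ?_
      have hsplit := List.takeWhile_append_dropWhile (p := PySem.Chars.isspace) (l := l)
      rcases List.mem_append.mp (by rw [hsplit]; exact hx) with h1 | h1
      · exact absurd (List.mem_takeWhile_imp h1) hsp
      · exact h1
  · intro h x hx
    exact h x ((List.dropWhile_sublist (p := PySem.Chars.isspace) (l := l)).mem hx)

lemma strip_ne_nil_iff (l : List Char) :
    PySem.Chars.strip l ≠ [] ↔ l.any (fun c => !PySem.Chars.isspace c) = true := by
  rw [Ne, strip_eq_nil_iff]
  simp [List.all_eq_true, List.any_eq_true]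

-- the first line of pvSplit cs has a non-whitespace char iff the regex lookahead fires at cs
lemma head_any_eq_look (cs h : List Char) (t : List (List Char)) (hs : pvSplit cs = h :: t) :
    h.any (fun c => !PySem.Chars.isspace c) = pvLookSol cs := by
  induction cs generalizing h t with
  | nil =>
    simp only [pvSplit] at hs
    injection hs with h1 _
    rw [← h1]
    simp [pvLookSol]
  | cons c r ih =>
    by_cases hc : c = '\n'
    · subst hc
      simp only [pvSplit, reduceIte] at hs
      injection hs with h1 _
      rw [← h1]
      simp [pvLookSol]
    · simp only [pvSplit, hc, if_false] at hs
      cases hr : pvSplit r with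
      | nil => exact absurd hr (pvSplit_ne_nil r)
      | cons a t' =>
        rw [hr] at hs
        simp only [pvMapHead] at hs
        injection hs with h1 _
        subst h1
        by_cases hsp : PySem.Chars.isspace c = true
        · simp [List.any_cons, hsp, pvLookSol, hc, ih a t' hr]
        · simp [List.any_cons, hsp, pvLookSol, hc]

-- spelled-out join of a cons
lemma join_cons (x : List Char) (l : List (List Char)) :
    PySem.Chars.join ['\n'] (x :: l)
      = x ++ (if l = [] then [] else '\n' :: PySem.Chars.join ['\n'] l) := by
  cases l with
  | nil => simp [PySem.Chars.join, List.intercalate]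
  | cons y t => simp [PySem.Chars.join, List.intercalate, List.intersperse]

-- main computation lemma: A's join-of-mapped-lines equals B's single pass
lemma main_eq (cs : List Char) :
    PySem.Chars.join ['\n']
        ((pvSplit cs).map (fun line =>
          if line.any (fun c => !PySem.Chars.isspace c) = true
          then "    ".toList ++ line else line))
      = (if pvLookSol cs then [' ', ' ', ' ', ' '] else []) ++ pvSubMulti cs := by
  induction cs with
  | nil => simp [pvSplit, pvLookSol, pvSubMulti, PySem.Chars.join, List.intercalate]
  | cons c r ih =>
    by_cases hc : c = '\n'
    · subst hc
      simp only [pvSplit, if_true, List.map_cons]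
      rw [join_cons]
      have hne : (pvSplit r).map (fun line =>
          if line.any (fun c => !PySem.Chars.isspace c) = true
          then "    ".toList ++ line else line) ≠ [] := by
        simp [pvSplit_ne_nil r]
      simp only [List.any_nil, Bool.false_eq_true, if_false, hne, List.nil_append]
      rw [ih]
      simp only [pvLookSol, reduceIte, pvSubMulti]
      by_cases hb : pvLookSol r
      · simp [hb]
      · simp [hb]
    · cases hr : pvSplit r with
      | nil => exact absurd hr (pvSplit_ne_nil r)
      | cons h t =>
        simp only [pvSplit, hc, if_false, hr, pvMapHead, List.map_cons]
        rw [hr, List.map_cons] at ih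
        rw [join_cons] at ih ⊢
        have hhead := head_any_eq_look r h t hr
        have hsub : pvSubMulti (c :: r) = c :: pvSubMulti r := by simp [pvSubMulti, hc]
        rcases Bool.eq_false_or_eq_true (pvLookSol r) with hb | hb
        · rw [hb] at hhead
          simp only [hhead, hb, if_true] at ih
          rw [List.append_assoc] at ih
          replace ih := List.append_cancel_left ih
          have hany : ((c :: h).any fun c => !PySem.Chars.isspace c) = true := by
            simp [List.any_cons, hhead]
          have hlook : pvLookSol (c :: r) = true := by simp [pvLookSol, hc, hb]
          rw [hany, hlook, hsub]
          simp only [if_true]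
          rw [← ih]
          simp
        · rw [hb] at hhead
          simp only [hhead, hb, Bool.false_eq_true, if_false, List.nil_append] at ih
          by_cases hsp : PySem.Chars.isspace c = true
          · have hany : ((c :: h).any fun c => !PySem.Chars.isspace c) = false := by
              simp [List.any_cons, hsp, hhead]
            have hlook : pvLookSol (c :: r) = false := by simp [pvLookSol, hc, hsp, hb]
            rw [hany, hlook, hsub]
            simp only [Bool.false_eq_true, if_false, List.nil_append]
            rw [← ih]
            simp
          · have hany : ((c :: h).any fun c => !PySem.Chars.isspace c) = true := by
              simp [List.any_cons, hsp]
            have hlook : pvLookSol (c :: r) = true := by simp [pvLookSol, hc, hsp]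
            rw [hany, hlook, hsub]
            simp only [if_true]
            rw [← ih]
            simp

-- ===== VERDICT (by name: the statement is the Claim_ definition above) =====
theorem process_tab_content_spec : Claim_equal_process_tab_content := by
  intro s _
  show process_tab_content s = process_tab_content_alt s
  unfold process_tab_content process_tab_content_alt
  simp only [splitOn_char]
  have hfold : ∀ (lines : List (List Char)),
      lines.foldl (fun acc line =>
        if PySem.Chars.strip line ≠ [] then acc ++ ["    ".toList ++ line] else acc ++ [line]) []
      = lines.map (fun line =>
          if line.any (fun c => !PySem.Chars.isspace c) = true
          then "    ".toList ++ line else line) := by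
    intro lines
    have hfun : (fun (acc : List (List Char)) line =>
        if PySem.Chars.strip line ≠ [] then acc ++ ["    ".toList ++ line] else acc ++ [line])
        = (fun acc line => acc ++ [if line.any (fun c => !PySem.Chars.isspace c) = true
            then "    ".toList ++ line else line]) := by
      funext acc line
      by_cases h : PySem.Chars.strip line ≠ []
      · rw [if_pos h, if_pos ((strip_ne_nil_iff line).mp h)]
      · rw [if_neg h, if_neg (by
          intro hx
          exact h ((strip_ne_nil_iff line).mpr hx))]
    rw [hfun, PySem.List.foldl_append_singleton_eq_map, List.nil_append]
  rw [hfold, main_eq]
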